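-- pv_equiv track=rewrite | github.com/dionisio35/DAA | code/tools.py | get_n_to_balanced
-- ===== SOURCE A (Python) =====
-- def get_n_to_balanced(s,a,b):
--     neq=0
--     pos=0
--     for i in s:
--         if(i==a):
--             pos+=1
--         else:
--             if(pos):
--                 pos-=1
--             else:
--                 neq+=1
--     return pos,neq
-- ===== SOURCE B (Python) =====
-- def get_n_to_balanced(s, a, b):
--     bal = 0
--     mn = 0
--     for i in s:
--         bal += 1 if i == a else -1
--         if bal < mn:
--             mn = bal
--     neq = -mn if mn < 0 else 0
--     return bal + neq, neq
-- ===== Notes on version B (the rewrite author's own statement) =====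
-- stated objective: alternative
-- what changed: B replaces A's two-counter loop with a branch-free signed balance plus running-minimum pass, deriving (pos, neq) from the final balance and minimum in closed form.
import Mathlib
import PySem

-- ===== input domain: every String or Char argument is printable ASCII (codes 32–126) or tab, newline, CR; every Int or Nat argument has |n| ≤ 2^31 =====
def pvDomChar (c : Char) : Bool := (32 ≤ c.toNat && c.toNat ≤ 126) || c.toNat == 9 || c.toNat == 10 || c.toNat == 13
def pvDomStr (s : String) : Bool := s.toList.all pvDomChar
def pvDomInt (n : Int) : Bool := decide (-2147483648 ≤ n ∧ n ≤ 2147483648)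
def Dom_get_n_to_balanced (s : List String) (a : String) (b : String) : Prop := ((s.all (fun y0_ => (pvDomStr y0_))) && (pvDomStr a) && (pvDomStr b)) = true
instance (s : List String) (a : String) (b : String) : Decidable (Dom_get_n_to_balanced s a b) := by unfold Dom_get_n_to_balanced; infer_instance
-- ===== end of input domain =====

-- B recomputes the same (pos, neq) pair via a signed balance and running minimum, deriving both counts in closed form after a branch-light pass (alternative decomposition, same O(n) cost).
-- ===== PORT A =====
-- A: two counters, pos floored at zero by a branch.
def get_n_to_balanced (s : List String) (a : String) (b : String) : Int × Int :=
  let st := s.foldl (fun (st : Int × Int) i =>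
    if i == a then (st.1, st.2 + 1)
    else if st.2 ≠ 0 then (st.1, st.2 - 1) else (st.1 + 1, st.2)) (0, 0)
  (st.2, st.1)

-- ===== PORT B =====
-- B: signed balance + running minimum; counts derived in closed form after the loop.
def get_n_to_balanced_alt (s : List String) (a : String) (b : String) : Int × Int :=
  let st := s.foldl (fun (st : Int × Int) i =>
    let bal := st.1 + (if i == a then 1 else -1)
    (bal, if bal < st.2 then bal else st.2)) (0, 0)
  let neq := if st.2 < 0 then -st.2 else 0
  (st.1 + neq, neq)

-- ===== PRECONDITION & SPEC =====
def Spec_get_n_to_balanced (s : List String) (a : String) (b : String) (out : Int × Int) : Prop := out = get_n_to_balanced_alt s a b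
instance (s : List String) (a : String) (b : String) (out : Int × Int) : Decidable (Spec_get_n_to_balanced s a b out) := by unfold Spec_get_n_to_balanced; infer_instance

-- ===== CLAIM (what is proved, stated in full; the proofs are below) =====
def Claim_equal_get_n_to_balanced : Prop := ∀ (s : List String) (a : String) (b : String), Dom_get_n_to_balanced s a b → Spec_get_n_to_balanced s a b (get_n_to_balanced s a b)

-- ===== LEMMAS AND PROOFS =====

-- ===== VERDICT (by name: the statement is the Claim_ definition above) =====
-- Invariant linking A's state (neq, pos) with B's state (bal, minb):
-- pos = bal - minb and neq = c - minb, provided minb ≤ 0 and minb ≤ bal.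
theorem balance_invariant (a : String) (s : List String) :
    ∀ (bal minb c : Int), minb ≤ 0 → minb ≤ bal →
    s.foldl (fun (st : Int × Int) i =>
      if i == a then (st.1, st.2 + 1)
      else if st.2 ≠ 0 then (st.1, st.2 - 1) else (st.1 + 1, st.2)) (c - minb, bal - minb)
    = (let r := s.foldl (fun (st : Int × Int) i =>
        let bal := st.1 + (if i == a then 1 else -1)
        (bal, if bal < st.2 then bal else st.2)) (bal, minb)
       (c - r.2, r.1 - r.2)) := by
  induction s with
  | nil => intro bal minb c _ _; rfl
  | cons x xs ih =>
    intro bal minb c h0 hb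
    simp only [List.foldl_cons]
    by_cases hx : x == a
    · have h1 : (if x == a then ((c - minb : Int), bal - minb + 1)
          else if bal - minb ≠ 0 then (c - minb, bal - minb - 1) else (c - minb + 1, bal - minb))
          = (c - minb, (bal + 1) - minb) := by simp [hx]; ring
      have h2 : (bal + (if x == a then (1:Int) else -1),
          if bal + (if x == a then (1:Int) else -1) < minb then bal + (if x == a then (1:Int) else -1) else minb)
          = (bal + 1, minb) := by
        simp [hx]; omega
      rw [h1, h2]
      exact ih (bal + 1) minb c h0 (by omega)
    · by_cases hz : bal = minb
      · have h1 : (if x == a then ((c - minb : Int), bal - minb + 1)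
            else if bal - minb ≠ 0 then (c - minb, bal - minb - 1) else (c - minb + 1, bal - minb))
            = (c - (minb - 1), (bal - 1) - (minb - 1)) := by simp [hx, hz]; ring
        have h2 : (bal + (if x == a then (1:Int) else -1),
            if bal + (if x == a then (1:Int) else -1) < minb then bal + (if x == a then (1:Int) else -1) else minb)
            = (bal - 1, minb - 1) := by simp [hx]; omega
        rw [h1, h2]
        exact ih (bal - 1) (minb - 1) c (by omega) (by omega)
      · have h1 : (if x == a then ((c - minb : Int), bal - minb + 1)
            else if bal - minb ≠ 0 then (c - minb, bal - minb - 1) else (c - minb + 1, bal - minb))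
            = (c - minb, (bal - 1) - minb) := by
          have hnz : bal - minb ≠ 0 := by omega
          simp [hx, hnz]; ring
        have h2 : (bal + (if x == a then (1:Int) else -1),
            if bal + (if x == a then (1:Int) else -1) < minb then bal + (if x == a then (1:Int) else -1) else minb)
            = (bal - 1, minb) := by simp [hx]; omega
        rw [h1, h2]
        exact ih (bal - 1) minb c h0 (by omega)

-- B's running minimum never exceeds its starting value.
theorem min_antitone (a : String) : ∀ (s : List String) (st : Int × Int),
    (s.foldl (fun (st : Int × Int) i =>
      let bal := st.1 + (if i == a then 1 else -1)
      (bal, if bal < st.2 then bal else st.2)) st).2 ≤ st.2 := by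
  intro s
  induction s with
  | nil => intro st; exact le_rfl
  | cons x xs ih =>
    intro st
    refine le_trans (ih _) ?_
    dsimp only
    split <;> omega

theorem get_n_to_balanced_spec : Claim_equal_get_n_to_balanced := by
  intro s a b _
  unfold Spec_get_n_to_balanced get_n_to_balanced get_n_to_balanced_alt
  have h := balance_invariant a s 0 0 0 le_rfl le_rfl
  simp only [sub_zero] at h
  rw [h]
  have hmin := min_antitone a s (0, 0)
  generalize (s.foldl (fun (st : Int × Int) i =>
      let bal := st.1 + (if i == a then 1 else -1)
      (bal, if bal < st.2 then bal else st.2)) ((0:Int), (0:Int))) = r at hmin ⊢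
  by_cases hneg : r.2 < 0
  · simp only [hneg, if_pos, Prod.mk.injEq]
    constructor <;> ring
  · have h0 : r.2 = 0 := le_antisymm hmin (by omega)
    simp [h0]
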